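-- pv_equiv track=rewrite | github.com/taulukointipalvelut/utab | system/modules/io_modules.py | insert_ranking_for_results_of_debaters
-- ===== SOURCE A (Python) =====
-- import copy
--
-- def insert_ranking_for_results_of_debaters(individual_score_rows):
-- 	individual_score_rows_cp = copy.copy(individual_score_rows)
-- 	header = individual_score_rows_cp.pop(0)
-- 	individual_score_rows_cp.sort(key=lambda row: (row[2], -row[4]), reverse=True)
-- 	ranking = 1
-- 	stay = 0
-- 	for k in range(len(individual_score_rows_cp)-1):
-- 		if individual_score_rows_cp[k][2] != individual_score_rows_cp[k+1][2]:
-- 			individual_score_rows_cp[k].insert(0, ranking)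
-- 			ranking += 1 + stay
-- 			stay = 0
-- 		else:
-- 			individual_score_rows_cp[k].insert(0, ranking)
-- 			stay += 1
-- 	individual_score_rows_cp[-1].insert(0, ranking)
--
-- 	return [header] + individual_score_rows_cp
-- ===== SOURCE B (Python) =====
-- import copy
--
-- def insert_ranking_for_results_of_debaters(individual_score_rows):
--     rows = copy.copy(individual_score_rows)
--     header = rows.pop(0)
--     rows.sort(key=lambda row: (row[2], -row[4]), reverse=True)
--     # Competition rank is a pointwise formula: 1 + number of rows with a
--     # strictly better total score; no sequential ranking/tie state at all.
--     ranks = [1 + sum(1 for other in rows if other[2] > row[2]) for row in rows]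
--     for row, rank in zip(rows, ranks):
--         row.insert(0, rank)
--     return [header] + rows
-- ===== Notes on version B (the rewrite author's own statement) =====
-- stated objective: alternative
-- what changed: Replaces A's sequential scan with its ranking/stay counter pair by a pointwise closed form: after the same sort, each row's rank is computed independently as 1 + the count of rows with a strictly greater score (field 2), then prepended; no sequential rank state is carried between rows.
import Mathlib
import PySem

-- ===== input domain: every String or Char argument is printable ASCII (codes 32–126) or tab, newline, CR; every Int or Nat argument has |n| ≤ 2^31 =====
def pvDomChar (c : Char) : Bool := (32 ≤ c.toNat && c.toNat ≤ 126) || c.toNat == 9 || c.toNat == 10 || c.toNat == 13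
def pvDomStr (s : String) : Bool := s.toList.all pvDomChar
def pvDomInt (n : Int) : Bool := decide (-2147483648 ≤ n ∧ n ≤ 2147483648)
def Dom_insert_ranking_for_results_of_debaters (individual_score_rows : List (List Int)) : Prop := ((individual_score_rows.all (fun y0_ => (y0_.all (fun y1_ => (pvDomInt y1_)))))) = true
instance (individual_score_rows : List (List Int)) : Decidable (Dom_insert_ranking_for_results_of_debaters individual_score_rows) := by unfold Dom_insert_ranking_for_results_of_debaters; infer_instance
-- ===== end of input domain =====

-- B replaces A's sequential ranking/stay-counter scan by a pointwise closed form: after the same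
-- sort, each row's rank is 1 + the count of rows with strictly greater field 2 (competition
-- ranking by counting, no state between rows); equivalence is about the RETURN value (both
-- Pythons also mutate the shared row lists in place in the same way on inputs admitted by Pre_).


-- ===== PORT A =====
-- A's index loop 'for k in range(len(cp)-1)' compares cp[k][2] with cp[k+1][2] (both rows still
-- unmodified at that moment) and prepends the current ranking to cp[k]; the trailing
-- 'cp[-1].insert(0, ranking)' is the singleton case of the same traversal.  On cp = [] Python
-- raises IndexError at cp[-1] (excluded by Pre_); row[2] is the total pyGetD form, exact under
-- Pre_'s row-length bound.
def pvALoop : List (List Int) → Int → Int → List (List Int)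
  | [], _, _ => []
  | [r], ranking, _ => [ranking :: r]
  | r :: r2 :: rs, ranking, stay =>
    if PySem.List.pyGetD r 2 0 ≠ PySem.List.pyGetD r2 2 0 then
      (ranking :: r) :: pvALoop (r2 :: rs) (ranking + 1 + stay) 0
    else
      (ranking :: r) :: pvALoop (r2 :: rs) ranking (stay + 1)

def insert_ranking_for_results_of_debaters (individual_score_rows : List (List Int)) : List (List Int) :=
  match individual_score_rows with
  | [] => []        -- Python: IndexError from pop(0); excluded by Pre_
  | header :: rest =>
    let cp := PySem.List.sorted2 rest (fun row => PySem.List.pyGetD row 2 0)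
                (fun row => -(PySem.List.pyGetD row 4 0)) true
    header :: pvALoop cp 1 0

-- ===== PORT B =====
def insert_ranking_for_results_of_debaters_alt (individual_score_rows : List (List Int)) : List (List Int) :=
  match individual_score_rows with
  | [] => []        -- Python: IndexError from pop(0); excluded by Pre_
  | header :: rest =>
    let cp := PySem.List.sorted2 rest (fun row => PySem.List.pyGetD row 2 0)
                (fun row => -(PySem.List.pyGetD row 4 0)) true
    -- Source B: ranks = [1 + sum(1 for other in rows if other[2] > row[2]) for row in rows]
    let ranks := cp.map (fun row =>
      (1 : Int) + (cp.countP (fun other =>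
        decide (PySem.List.pyGetD row 2 0 < PySem.List.pyGetD other 2 0)) : Int))
    -- Source B: for row, rank in zip(rows, ranks): row.insert(0, rank)
    header :: (cp.zip ranks).map (fun p => p.2 :: p.1)

-- ===== PRECONDITION & SPEC =====
-- Pre_ excludes exactly the inputs where the Python A raises: the empty list (pop(0) IndexError),
-- a header-only list (cp[-1] IndexError), and data rows shorter than 5 (IndexError in the sort
-- key row[4] / the comparisons row[2]).
def Pre_insert_ranking_for_results_of_debaters (individual_score_rows : List (List Int)) : Prop :=
  2 ≤ individual_score_rows.length ∧ ∀ row ∈ individual_score_rows.tail, 5 ≤ row.length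
instance (individual_score_rows : List (List Int)) : Decidable (Pre_insert_ranking_for_results_of_debaters individual_score_rows) := by unfold Pre_insert_ranking_for_results_of_debaters; infer_instance

def pvWitness_insert_ranking_for_results_of_debaters : List (List Int) :=
  [[9], [0, 0, 3, 0, 1], [0, 0, 3, 0, 2], [0, 0, 1, 0, 5]]

def Spec_insert_ranking_for_results_of_debaters (individual_score_rows : List (List Int)) (out : List (List Int)) : Prop := out = insert_ranking_for_results_of_debaters_alt individual_score_rows
instance (individual_score_rows : List (List Int)) (out : List (List Int)) : Decidable (Spec_insert_ranking_for_results_of_debaters individual_score_rows out) := by unfold Spec_insert_ranking_for_results_of_debaters; infer_instance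

-- ===== CLAIM (what is proved, stated in full; the proofs are below) =====
def Claim_equal_insert_ranking_for_results_of_debaters : Prop := ∀ (individual_score_rows : List (List Int)), Dom_insert_ranking_for_results_of_debaters individual_score_rows → Pre_insert_ranking_for_results_of_debaters individual_score_rows → Spec_insert_ranking_for_results_of_debaters individual_score_rows (insert_ranking_for_results_of_debaters individual_score_rows)

-- ===== LEMMAS AND PROOFS =====

-- Proof-only view of A's scan: maximal runs of equal row[2] keys, ranked by starting position.
def pvGroups : List (List Int) → List (List (List Int))
  | [] => []
  | r :: rs =>
    match pvGroups rs with
    | [] => [[r]]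
    | g :: gs =>
      if PySem.List.pyGetD r 2 0 == PySem.List.pyGetD (g.headD []) 2 0 then
        (r :: g) :: gs
      else
        [r] :: g :: gs

def pvBAssign : List (List (List Int)) → Nat → List (List Int)
  | [], _ => []
  | g :: gs, offset =>
    g.map (fun x => ((offset : Int) + 1) :: x) ++ pvBAssign gs (offset + g.length)

-- row[2], the score key both programs sort and rank by.
def pvKey (r : List Int) : Int := PySem.List.pyGetD r 2 0

-- pvGroups peels off the head row's maximal run of equal row[2] keys.
lemma pvGroups_cons (rs : List (List Int)) : ∀ (r : List Int),
    pvGroups (r :: rs) =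
      ((r :: rs).takeWhile (fun x => PySem.List.pyGetD x 2 0 == PySem.List.pyGetD r 2 0))
        :: pvGroups ((r :: rs).dropWhile (fun x => PySem.List.pyGetD x 2 0 == PySem.List.pyGetD r 2 0)) := by
  induction rs with
  | nil => intro r; simp [pvGroups]
  | cons r2 rs ih =>
    intro r
    have hstep : pvGroups (r :: r2 :: rs) =
        (match pvGroups (r2 :: rs) with
          | [] => [[r]]
          | g :: gs =>
            if PySem.List.pyGetD r 2 0 == PySem.List.pyGetD (g.headD []) 2 0 then
              (r :: g) :: gs
            else [r] :: g :: gs) := rfl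
    by_cases hk : PySem.List.pyGetD r2 2 0 = PySem.List.pyGetD r 2 0
    · rw [hstep, ih r2]
      simp [hk.symm]
    · have hk' : (PySem.List.pyGetD r2 2 0 == PySem.List.pyGetD r 2 0) = false := by simp [hk]
      have hk2 : (PySem.List.pyGetD r 2 0 == PySem.List.pyGetD r2 2 0) = false := by
        simp [Ne.symm hk]
      rw [hstep, ih r2]
      simp only [List.takeWhile_cons, List.dropWhile_cons, hk', Bool.false_eq_true, if_false,
        beq_self_eq_true, if_true, List.headD_cons, hk2]
      rw [ih r2]
      simp

-- The invariant linking A's scan to the run view: when pvALoop reaches row r with ranking n+1 and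
-- stay s, it assigns n+1 throughout r's maximal run and continues exactly like pvBAssign on the
-- remaining groups at offset n+s+|run|.
lemma pvLoop_aux (rs : List (List Int)) : ∀ (r : List Int) (n s : Nat),
    pvALoop (r :: rs) ((n : Int) + 1) (s : Int) =
      ((r :: rs).takeWhile (fun x => PySem.List.pyGetD x 2 0 == PySem.List.pyGetD r 2 0)).map
          (fun x => ((n : Int) + 1) :: x)
        ++ pvBAssign (pvGroups ((r :: rs).dropWhile (fun x => PySem.List.pyGetD x 2 0 == PySem.List.pyGetD r 2 0)))
            (n + s + ((r :: rs).takeWhile (fun x => PySem.List.pyGetD x 2 0 == PySem.List.pyGetD r 2 0)).length) := by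
  induction rs with
  | nil =>
    intro r n s
    simp [pvALoop, pvGroups, pvBAssign, List.takeWhile, List.dropWhile]
  | cons r2 rs ih =>
    intro r n s
    by_cases hk : PySem.List.pyGetD r2 2 0 = PySem.List.pyGetD r 2 0
    · have ha : pvALoop (r :: r2 :: rs) ((n : Int) + 1) (s : Int) =
          (((n : Int) + 1) :: r) :: pvALoop (r2 :: rs) ((n : Int) + 1) ((s : Int) + 1) := by
        simp [pvALoop, hk.symm]
      rw [ha]
      have hs1 : ((s : Int) + 1) = (((s + 1 : Nat) : Int)) := by push_cast; ring
      rw [hs1, ih r2 n (s + 1)]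
      simp only [List.takeWhile_cons, List.dropWhile_cons, hk, beq_self_eq_true, if_true,
        List.map_cons, List.length_cons, List.cons_append, List.cons.injEq, true_and]
      congr 2
      omega
    · have ha : pvALoop (r :: r2 :: rs) ((n : Int) + 1) (s : Int) =
          (((n : Int) + 1) :: r) :: pvALoop (r2 :: rs) (((n : Int) + 1) + 1 + s) 0 := by
        simp [pvALoop]
        intro h; exact absurd h.symm hk
      rw [ha]
      have hn1 : ((n : Int) + 1) + 1 + (s : Int) = (n : Int) + (s : Int) + 1 + 1 := by ring
      have hih := ih r2 (n + s + 1) 0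
      norm_num at hih
      rw [hn1, hih]
      have hk' : (PySem.List.pyGetD r2 2 0 == PySem.List.pyGetD r 2 0) = false := by simp [hk]
      simp only [List.takeWhile_cons, List.dropWhile_cons, hk', beq_self_eq_true, if_true,
        Bool.false_eq_true, if_false, List.map_cons, List.map_nil, List.length_cons,
        List.length_nil, List.cons_append, List.nil_append, List.cons.injEq, true_and]
      rw [pvGroups_cons rs r2, pvBAssign]
      simp only [List.takeWhile_cons, List.dropWhile_cons, beq_self_eq_true, if_true,
        List.map_cons, List.length_cons, List.cons_append, List.cons.injEq]
      push_cast
      simp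

lemma pvLoop_eq (rows : List (List Int)) (n : Nat) :
    pvALoop rows ((n : Int) + 1) 0 = pvBAssign (pvGroups rows) n := by
  cases rows with
  | nil => simp [pvALoop, pvGroups, pvBAssign]
  | cons r rs =>
    have h0 : ((0 : Nat) : Int) = (0 : Int) := rfl
    rw [← h0, pvLoop_aux rs r n 0, pvGroups_cons rs r, pvBAssign]
    simp

-- Insertion by a strict (asymmetric, transitive) Boolean order preserves the sortedness invariant.
lemma insertBy_pairwise {α : Type} (before : α → α → Bool)
    (htr : ∀ a b c, before a b = true → before b c = true → before a c = true)
    (has : ∀ a b, before a b = true → before b a = false) :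
    ∀ (acc : List α), acc.Pairwise (fun a b => before b a = false) →
      ∀ x, (PySem.List.insertBy before x acc).Pairwise (fun a b => before b a = false) := by
  intro acc
  induction acc with
  | nil => intro _ x; simp [PySem.List.insertBy]
  | cons y ys ih =>
    intro h x
    rw [PySem.List.insertBy]
    by_cases hb : before x y = true
    · rw [if_pos hb]
      refine List.Pairwise.cons ?_ h
      intro z hz
      rcases List.mem_cons.1 hz with rfl | hz
      · exact has _ _ hb
      · by_cases hzx : before z x = true
        · have := htr _ _ _ hzx hb
          have h2 := List.rel_of_pairwise_cons h hz
          rw [this] at h2; exact absurd h2 (by simp)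
        · simpa using hzx
    · rw [if_neg hb]
      refine List.Pairwise.cons ?_ (ih h.of_cons x)
      intro z hz
      rcases (PySem.List.mem_insertBy _ _ _ _).1 hz with rfl | hz
      · simpa using hb
      · exact List.rel_of_pairwise_cons h hz

lemma foldl_insertBy_pairwise {α : Type} (before : α → α → Bool)
    (htr : ∀ a b c, before a b = true → before b c = true → before a c = true)
    (has : ∀ a b, before a b = true → before b a = false) :
    ∀ (xs acc : List α), acc.Pairwise (fun a b => before b a = false) →
      (xs.foldl (fun acc x => PySem.List.insertBy before x acc) acc).Pairwise
        (fun a b => before b a = false) := by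
  intro xs
  induction xs with
  | nil => intro acc h; simpa using h
  | cons x xs ih =>
    intro acc h
    exact ih _ (insertBy_pairwise before htr has acc h x)

-- sorted(xs, key=lambda x: (k1 x, k2 x), reverse=True) is weakly decreasing in its first key.
lemma sorted2_rev_pairwise_fst {α : Type} (xs : List α) (k1 k2 : α → Int) :
    (PySem.List.sorted2 xs k1 k2 true).Pairwise (fun a b => k1 b ≤ k1 a) := by
  have hdef : PySem.List.sorted2 xs k1 k2 true =
      xs.foldl (fun acc x => PySem.List.insertBy
        (fun a b => decide (k1 b < k1 a) || (!decide (k1 a < k1 b) && decide (k2 b < k2 a)))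
        x acc) [] := rfl
  have h := foldl_insertBy_pairwise
      (fun a b => decide (k1 b < k1 a) || (!decide (k1 a < k1 b) && decide (k2 b < k2 a)))
      (by intro a b c hab hbc
          simp only [Bool.or_eq_true, Bool.and_eq_true, Bool.not_eq_eq_eq_not, Bool.not_true,
            decide_eq_true_eq, decide_eq_false_iff_not] at hab hbc ⊢
          rcases hab with h1 | ⟨h1, h2⟩ <;> rcases hbc with h3 | ⟨h3, h4⟩ <;> omega)
      (by intro a b hab
          simp only [Bool.or_eq_true, Bool.and_eq_true, Bool.not_eq_eq_eq_not, Bool.not_true,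
            decide_eq_true_eq, decide_eq_false_iff_not, Bool.or_eq_false_iff,
            Bool.and_eq_false_iff] at hab ⊢
          rcases hab with h1 | ⟨h1, h2⟩ <;> constructor <;> first | omega | (left; simp; omega))
      xs [] (by simp)
  rw [hdef]
  refine h.imp ?_
  intro a b hab
  simp only [Bool.or_eq_false_iff, decide_eq_false_iff_not] at hab
  omega

-- Run-by-run assignment equals B's pointwise counting formula on a sorted suffix.
lemma pvCount (full : List (List Int)) : ∀ (n : Nat) (ys done : List (List Int)),
    ys.length ≤ n →
    full = done ++ ys →
    ys.Pairwise (fun a b => pvKey b ≤ pvKey a) →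
    (∀ x ∈ done, ∀ y ∈ ys, pvKey y < pvKey x) →
    pvBAssign (pvGroups ys) done.length =
      ys.map (fun r =>
        ((1 : Int) + (full.countP (fun x => decide (pvKey r < pvKey x)) : Int)) :: r) := by
  intro n
  induction n with
  | zero =>
    intro ys done hlen _ _ _
    have : ys = [] := List.eq_nil_of_length_eq_zero (Nat.le_zero.1 hlen)
    subst this; simp [pvGroups, pvBAssign]
  | succ n ih =>
    intro ys done hlen hfull hp hdone
    cases ys with
    | nil => simp [pvGroups, pvBAssign]
    | cons r rs =>
      set p : List Int → Bool := fun x => PySem.List.pyGetD x 2 0 == PySem.List.pyGetD r 2 0 with hpdef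
      have hsplit : (r :: rs).takeWhile p ++ (r :: rs).dropWhile p = r :: rs :=
        List.takeWhile_append_dropWhile
      have hhead : ∀ y ∈ r :: rs, pvKey y ≤ pvKey r := by
        intro y hy
        rcases List.mem_cons.1 hy with rfl | hy
        · exact le_refl _
        · exact List.rel_of_pairwise_cons hp hy
      -- every row of the head run has key = pvKey r
      have hrun : ∀ q ∈ (r :: rs).takeWhile p, pvKey q = pvKey r := by
        intro q hq
        have := List.mem_takeWhile_imp hq
        simpa [hpdef, pvKey] using this
      -- every row after the run has key < pvKey r
      have hlt_d : ∀ y ∈ (r :: rs).dropWhile p, pvKey y < pvKey r := by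
        have hsub : ((r :: rs).dropWhile p).Sublist (r :: rs) := List.dropWhile_sublist p
        cases hd : (r :: rs).dropWhile p with
        | nil => simp
        | cons h tl =>
          have hph : p h = false := by
            have := List.head?_dropWhile_not p (r :: rs)
            rw [hd] at this; simpa using this
          have hhne : pvKey h ≠ pvKey r := by
            simpa [hpdef, pvKey] using hph
          have hhle : pvKey h ≤ pvKey r := by
            refine hhead h ?_
            have : h ∈ (r :: rs).dropWhile p := by rw [hd]; exact List.mem_cons_self
            exact (List.dropWhile_sublist p).mem this
          have hhlt : pvKey h < pvKey r := lt_of_le_of_ne hhle hhne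
          intro y hy
          rcases List.mem_cons.1 hy with rfl | hy
          · exact hhlt
          · have hpd : ((r :: rs).dropWhile p).Pairwise (fun a b => pvKey b ≤ pvKey a) :=
              List.Pairwise.sublist (List.dropWhile_sublist p) hp
            rw [hd] at hpd
            exact lt_of_le_of_lt (List.rel_of_pairwise_cons hpd hy) hhlt
      -- the counting value on rows of the head run
      have hcnt : ∀ q ∈ (r :: rs).takeWhile p,
          full.countP (fun x => decide (pvKey q < pvKey x)) = done.length := by
        intro q hq
        have hq' := hrun q hq
        rw [hfull, List.countP_append]
        have h1 : done.countP (fun x => decide (pvKey q < pvKey x)) = done.length := by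
          rw [List.countP_eq_length]
          intro x hx
          simp only [decide_eq_true_eq]
          rw [hq']
          exact hdone x hx r List.mem_cons_self
        have h2 : (r :: rs).countP (fun x => decide (pvKey q < pvKey x)) = 0 := by
          rw [List.countP_eq_zero]
          intro y hy
          simp only [decide_eq_true_eq, not_lt]
          rw [hq']
          exact hhead y hy
        omega
      -- run head is in the run, so the run is nonempty
      have htne : (r :: rs).takeWhile p = r :: rs.takeWhile p := by
        simp [hpdef]
      have hdlen : ((r :: rs).dropWhile p).length ≤ n := by
        have := congrArg List.length hsplit
        rw [List.length_append, htne] at this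
        simp only [List.length_cons] at this hlen
        omega
      -- recursive step on the rows after the run
      have hih := ih ((r :: rs).dropWhile p) (done ++ (r :: rs).takeWhile p) hdlen
        (by rw [List.append_assoc, hsplit, hfull])
        (List.Pairwise.sublist (List.dropWhile_sublist p) hp)
        (by
          intro x hx y hy
          rcases List.mem_append.1 hx with hx | hx
          · exact hdone x hx y ((List.dropWhile_sublist p).mem hy)
          · rw [hrun x hx]; exact hlt_d y hy)
      rw [pvGroups_cons, pvBAssign]
      rw [List.length_append] at hih
      rw [hih]
      conv_rhs => rw [← hsplit]
      rw [List.map_append]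
      congr 1
      apply List.map_congr_left
      intro q hq
      rw [hcnt q hq]
      congr 1
      omega

-- Source B's zip-of-precomputed-ranks pass, as a single map.
lemma zip_map_ranks (f : List Int → Int) (cp : List (List Int)) :
    ((cp.zip (cp.map f)).map (fun p => p.2 :: p.1)) = cp.map (fun r => f r :: r) := by
  induction cp with
  | nil => rfl
  | cons r rs ih => simp [ih]

-- ===== VERDICT (by name: the statement is the Claim_ definition above) =====
theorem insert_ranking_for_results_of_debaters_spec : Claim_equal_insert_ranking_for_results_of_debaters := by
  intro xs _ _
  unfold Spec_insert_ranking_for_results_of_debaters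
  cases xs with
  | nil => rfl
  | cons header rest =>
    simp only [insert_ranking_for_results_of_debaters, insert_ranking_for_results_of_debaters_alt]
    set cp := PySem.List.sorted2 rest (fun row => PySem.List.pyGetD row 2 0)
      (fun row => -(PySem.List.pyGetD row 4 0)) true with hcp
    rw [zip_map_ranks]
    congr 1
    have hpair : cp.Pairwise (fun a b => pvKey b ≤ pvKey a) := by
      simpa [pvKey] using sorted2_rev_pairwise_fst rest
        (fun row => PySem.List.pyGetD row 2 0) (fun row => -(PySem.List.pyGetD row 4 0))
    have hc := pvCount cp cp.length cp [] (le_refl _) rfl hpair (by simp)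
    have h1 : pvALoop cp (((0 : Nat) : Int) + 1) 0 = pvBAssign (pvGroups cp) 0 := pvLoop_eq cp 0
    norm_num at h1
    rw [h1]
    simpa [pvKey] using hc
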